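-- pv_equiv track=rewrite | github.com/DNA-origamicon/NADOC | backend/parameterization/md_setup.py | _count_itp_residues
-- ===== SOURCE A (Python) =====
-- def _count_itp_residues(itp_text: str) -> int:
--     """Return the number of distinct residues in an ITP [ atoms ] section."""
--     in_atoms = False
--     resids: set[int] = set()
--     for line in itp_text.splitlines():
--         s = line.strip()
--         if s.startswith("[") and "atoms" in s.lower():
--             in_atoms = True; continue
--         if s.startswith("["):
--             in_atoms = False; continue
--         if not in_atoms or not s or s.startswith(";"):
--             continue
--         parts = s.split()
--         if len(parts) >= 3:
--             try:
--                 resids.add(int(parts[2]))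
--             except ValueError:
--                 pass
--     return len(resids)
-- ===== SOURCE B (Python) =====
-- def _count_itp_residues(itp_text: str) -> int:
--     """Section-index variant: split the text into [header]/body sections first,
--     then collect residue ids from every 'atoms' section into one shared set."""
--     lines = [raw.strip() for raw in itp_text.splitlines()]
--     n = len(lines)
--     resids: set[int] = set()
--     i = 0
--     while i < n:
--         s = lines[i]
--         i += 1
--         if not s.startswith("["):
--             continue  # line before/without a header: no section open here
--         # body = lines up to (not including) the next header
--         j = i
--         while j < n and not lines[j].startswith("["):
--             j += 1
--         if "atoms" in s.lower():
--             for t in lines[i:j]: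
--                 if not t or t.startswith(";"):
--                     continue
--                 parts = t.split()
--                 if len(parts) >= 3:
--                     try:
--                         resids.add(int(parts[2]))
--                     except ValueError:
--                         pass
--         i = j
--     return len(resids)
-- ===== Notes on version B (the rewrite author's own statement) =====
-- stated objective: alternative
-- what changed: Replaced A's flag-gated single pass with an index-then-scan decomposition: strip all lines once, locate each [header], scan its body up to the next header, and collect residue ids only from sections whose header contains 'atoms'.
import Mathlib
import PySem

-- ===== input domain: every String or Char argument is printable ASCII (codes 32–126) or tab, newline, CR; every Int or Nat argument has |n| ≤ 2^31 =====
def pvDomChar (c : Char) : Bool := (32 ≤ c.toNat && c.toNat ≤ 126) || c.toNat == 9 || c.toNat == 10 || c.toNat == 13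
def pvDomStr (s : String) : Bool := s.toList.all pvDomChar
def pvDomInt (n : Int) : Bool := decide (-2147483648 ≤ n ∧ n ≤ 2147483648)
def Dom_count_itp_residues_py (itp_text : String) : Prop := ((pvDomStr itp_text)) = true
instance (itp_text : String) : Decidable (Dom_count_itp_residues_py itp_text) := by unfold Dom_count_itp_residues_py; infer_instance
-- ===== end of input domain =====

-- B re-groups the lines into [header]/body sections first (index-then-scan) instead of A's
-- flag-gated single pass; same result, stated objective: alternative decomposition.

-- ===== PORT A =====
-- one iteration of A's loop, on the already-stripped line s (A computes s = line.strip() first)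
def pvStepA (st : Bool × PySem.Set Int) (s : List Char) : Bool × PySem.Set Int :=
  if PySem.Chars.startswith s ['['] && PySem.Chars.isIn "atoms".toList (PySem.Chars.lower s) then
    (true, st.2)
  else if PySem.Chars.startswith s ['['] then
    (false, st.2)
  else if !st.1 || s.isEmpty || PySem.Chars.startswith s [';'] then
    st
  else
    let parts := PySem.Chars.split₀ s
    if 3 ≤ parts.length then
      match PySem.Int.ofChars? (parts.getD 2 []) with
      | some n => (st.1, PySem.Set.add st.2 n)
      | none => (st.1, st.2)
    else (st.1, st.2)

def count_itp_residues_py (itp_text : String) : Int :=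
  (((PySem.Chars.splitlines itp_text.toList).foldl
      (fun st line => pvStepA st (PySem.Chars.strip line)) (false, PySem.Set.empty)).2.length : Int)

-- ===== PORT B =====
def pvHdr (s : List Char) : Bool := PySem.Chars.startswith s ['[']

-- process one body line t of an 'atoms' section
def pvProcB (acc : PySem.Set Int) (t : List Char) : PySem.Set Int :=
  if t.isEmpty || PySem.Chars.startswith t [';'] then acc
  else
    let parts := PySem.Chars.split₀ t
    if 3 ≤ parts.length then
      match PySem.Int.ofChars? (parts.getD 2 []) with
      | some n => PySem.Set.add acc n
      | none => acc
    else acc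

-- B's outer while-loop: at a header, scan its body (up to the next header), then resume there
def pvSecGo : List (List Char) → PySem.Set Int → PySem.Set Int
  | [], acc => acc
  | s :: rest, acc =>
    if pvHdr s then
      pvSecGo (rest.dropWhile (fun t => !pvHdr t))
        (if PySem.Chars.isIn "atoms".toList (PySem.Chars.lower s) then
           (rest.takeWhile (fun t => !pvHdr t)).foldl pvProcB acc
         else acc)
    else pvSecGo rest acc
termination_by ls _ => ls.length
decreasing_by
  · exact Nat.lt_succ_of_le (List.length_dropWhile_le _ _)
  · simp

def count_itp_residues_py_alt (itp_text : String) : Int :=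
  ((pvSecGo ((PySem.Chars.splitlines itp_text.toList).map PySem.Chars.strip)
      PySem.Set.empty).length : Int)

-- ===== PRECONDITION & SPEC =====
def Spec_count_itp_residues_py (itp_text : String) (out : Int) : Prop := out = count_itp_residues_py_alt itp_text
instance (itp_text : String) (out : Int) : Decidable (Spec_count_itp_residues_py itp_text out) := by unfold Spec_count_itp_residues_py; infer_instance

-- ===== CLAIM (what is proved, stated in full; the proofs are below) =====
def Claim_equal_count_itp_residues_py : Prop := ∀ (itp_text : String), Dom_count_itp_residues_py itp_text → Spec_count_itp_residues_py itp_text (count_itp_residues_py itp_text)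

-- ===== LEMMAS AND PROOFS =====

-- pvSecGo skips leading non-header lines
theorem pvSecGo_dropWhile (ls : List (List Char)) (acc : PySem.Set Int) :
    pvSecGo (ls.dropWhile (fun t => !pvHdr t)) acc = pvSecGo ls acc := by
  induction ls with
  | nil => rfl
  | cons s t ih =>
    by_cases h : pvHdr s
    · simp [h]
    · simp only [List.dropWhile_cons, h, Bool.not_false, if_pos]
      rw [ih, pvSecGo]
      simp [h]

-- A's flag-machine fold equals B's section recursion: with the flag up, the leading
-- non-header lines are processed as body lines; from the next header on, the two agree.
theorem pvFold_eq_secGo (ls : List (List Char)) (b : Bool) (acc : PySem.Set Int) :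
    (ls.foldl pvStepA (b, acc)).2 =
      pvSecGo (ls.dropWhile (fun t => !pvHdr t))
        (if b then (ls.takeWhile (fun t => !pvHdr t)).foldl pvProcB acc else acc) := by
  induction ls generalizing b acc with
  | nil => cases b <;> simp [pvSecGo]
  | cons s t ih =>
    by_cases h : pvHdr s
    · have hstep : pvStepA (b, acc) s =
          (PySem.Chars.isIn "atoms".toList (PySem.Chars.lower s), acc) := by
        unfold pvStepA
        unfold pvHdr at h
        cases PySem.Chars.isIn "atoms".toList (PySem.Chars.lower s) <;> simp [h]
      simp only [List.foldl_cons, hstep, List.dropWhile_cons, List.takeWhile_cons, h,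
        Bool.not_true, if_neg Bool.false_ne_true]
      rw [ih]
      conv_rhs => rw [pvSecGo]
      cases PySem.Chars.isIn "atoms".toList (PySem.Chars.lower s) <;>
        cases b <;> simp [h]
    · have hh : pvHdr s = false := by simpa using h
      cases b with
      | false =>
        have hstep : pvStepA (false, acc) s = (false, acc) := by
          unfold pvStepA; unfold pvHdr at hh; simp [hh]
        simp only [List.foldl_cons, hstep, List.dropWhile_cons, hh, Bool.not_false, if_pos]
        rw [ih]
        simp
      | true =>
        have hstep : pvStepA (true, acc) s = (true, pvProcB acc s) := by
          unfold pvStepA pvProcB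
          unfold pvHdr at hh
          by_cases he : s.isEmpty || PySem.Chars.startswith s [';']
          · simp [hh, he]
          · simp only [Bool.or_eq_true, not_or] at he
            simp only [hh, he.1, he.2, Bool.false_and, Bool.not_true,
              Bool.or_self, if_neg Bool.false_ne_true]
            split <;> try rfl
            split <;> rfl
        simp only [List.foldl_cons, hstep, List.dropWhile_cons, List.takeWhile_cons, hh,
          Bool.not_false, if_pos]
        rw [ih]
        simp

-- ===== VERDICT (by name: the statement is the Claim_ definition above) =====
theorem count_itp_residues_py_spec : Claim_equal_count_itp_residues_py := by
  intro itp_text _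
  unfold Spec_count_itp_residues_py count_itp_residues_py count_itp_residues_py_alt
  rw [← List.foldl_map]
  rw [pvFold_eq_secGo, if_neg Bool.false_ne_true, pvSecGo_dropWhile]
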